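-- pv_equiv track=rewrite | github.com/marcv81/gitlab-codeowners | codeowners.py | _read_pattern
-- ===== SOURCE A (Python) =====
-- class ParseError(Exception):
--     def __init__(self, message):
--         super().__init__(message)
--
-- def _read_pattern(line, i=0):
--     """Returns the contents of the line from the specified index
--     until the first space character. Also returns the index of
--     the next character. Spaces may be escaped with a backslash.
--     """
--     result = list()
--     escaped = False
--     while i < len(line):
--         if escaped:
--             escaped = False
--             if line[i] != " ":
--                 raise ParseError("only space may be escaped")
--             result.append(line[i])
--         else:
--             if line[i] == "\\":
--                 escaped = True
--             else:
--                 if line[i] == " ":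
--                     break
--                 result.append(line[i])
--         i += 1
--     if escaped:
--         raise ParseError("unclosed escape sequence")
--     result = "".join(result)
--     return result, i
-- ===== SOURCE B (Python) =====
-- class ParseError(Exception):
--     def __init__(self, message):
--         super().__init__(message)
--
-- def _read_pattern(line, i=0):
--     """Returns the contents of the line from the specified index
--     until the first space character. Also returns the index of
--     the next character. Spaces may be escaped with a backslash.
--     """
--     parts = []
--     n = len(line)
--     while i < n:
--         b = line.find("\\", i)
--         if b == -1:
--             b = n
--         s = line.find(" ", i, b)
--         if s != -1:
--             parts.append(line[i:s])
--             return "".join(parts), s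
--         parts.append(line[i:b])
--         i = b
--         if i < n:
--             if i + 1 >= n:
--                 raise ParseError("unclosed escape sequence")
--             if line[i + 1] != " ":
--                 raise ParseError("only space may be escaped")
--             parts.append(" ")
--             i += 2
--     return "".join(parts), i
-- ===== Notes on version B (the rewrite author's own statement) =====
-- stated objective: faster
-- what changed: Replaces A's per-character two-state (escaped flag) scan with a chunk-based loop: str.find jumps directly to the next backslash and searches for a space only inside that window, appending whole slices instead of single characters.
-- outside the precondition, e.g. on _read_pattern('ab', -1): A returns ('bab', 2), B returns ('b', 2)
import Mathlib
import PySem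

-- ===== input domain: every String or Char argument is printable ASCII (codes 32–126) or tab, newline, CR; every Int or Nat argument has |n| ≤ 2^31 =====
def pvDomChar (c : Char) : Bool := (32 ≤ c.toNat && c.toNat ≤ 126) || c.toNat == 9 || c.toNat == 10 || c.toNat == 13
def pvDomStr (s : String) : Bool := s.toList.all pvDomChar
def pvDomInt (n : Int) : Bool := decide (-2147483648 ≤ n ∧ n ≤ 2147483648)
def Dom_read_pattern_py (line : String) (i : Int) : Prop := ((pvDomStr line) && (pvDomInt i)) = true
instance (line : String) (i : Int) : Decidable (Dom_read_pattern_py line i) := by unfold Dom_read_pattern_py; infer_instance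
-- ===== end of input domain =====

-- B replaces A's per-character escaped-flag scan with a chunk-based loop that
-- uses find to jump to the next backslash and appends whole slices (objective:
-- faster by a constant factor, measured).

-- ===== PORT A =====
-- `none` marks the paths where the Python raises (ParseError / IndexError).
def readA_loop (cs : List Char) (i : Int) (escaped : Bool) (acc : List Char) :
    Option (List Char × Int) :=
  if _h : i < (cs.length : Int) then
    match PySem.List.pyGet? cs i with
    | none => none            -- IndexError
    | some c =>
      if escaped then
        if c ≠ ' ' then none  -- ParseError "only space may be escaped"
        else readA_loop cs (i + 1) false (acc ++ [c])
      else if c = '\\' then readA_loop cs (i + 1) true acc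
      else if c = ' ' then some (acc, i)   -- break
      else readA_loop cs (i + 1) false (acc ++ [c])
  else if escaped then none   -- ParseError "unclosed escape sequence"
  else some (acc, i)
termination_by ((cs.length : Int) - i).toNat
decreasing_by all_goals omega

def read_pattern_py (line : String) (i : Int) : String × Int :=
  match readA_loop line.toList i false [] with
  | some (acc, j) => (String.ofList acc, j)
  | none => ("", -1)          -- unreachable inside Pre_ (the Python raises)

-- ===== PORT B =====
-- Port of Python's str.find(c, start, stop) for a single character and
-- 0 ≤ start: the first index in [start, stop) holding c, `none` for -1.
def findCh (cs : List Char) (c : Char) (start stop : Nat) : Option Nat :=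
  (((cs.take stop).drop start).findIdx? (· = c)).map (start + ·)

-- fact the loop below cites for termination
theorem findCh_getD_ge (cs : List Char) (c : Char) (start stop : Nat)
    (h : start ≤ stop) : start ≤ (findCh cs c start stop).getD stop := by
  unfold findCh
  cases ((cs.take stop).drop start).findIdx? (· = c) with
  | none => simpa using h
  | some k => simp

def readB_loop (cs : List Char) (i : Int) (acc : List Char) :
    Option (List Char × Int) :=
  if _h : i < (cs.length : Int) then
    let b : Nat := (findCh cs '\\' i.toNat cs.length).getD cs.length
    match findCh cs ' ' i.toNat b with
    | some s => some (acc ++ (cs.take s).drop i.toNat, (s : Int))  -- return at space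
    | none =>
      let acc' := acc ++ (cs.take b).drop i.toNat
      if _hb : (b : Int) < (cs.length : Int) then
        -- b points at a backslash: peek the escaped character
        if (cs.length : Int) ≤ (b : Int) + 1 then none  -- ParseError "unclosed escape sequence"
        else
          match PySem.List.pyGet? cs ((b : Int) + 1) with
          | none => none
          | some c2 =>
            if c2 ≠ ' ' then none  -- ParseError "only space may be escaped"
            else readB_loop cs ((b : Int) + 2) (acc' ++ [' '])
      else some (acc', (b : Int))
  else some (acc, i)
termination_by ((cs.length : Int) - i).toNat
decreasing_by
  have := findCh_getD_ge cs '\\' i.toNat cs.length (by omega)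
  omega

def read_pattern_py_alt (line : String) (i : Int) : String × Int :=
  match readB_loop line.toList i [] with
  | some (acc, j) => (String.ofList acc, j)
  | none => ("", -1)

-- ===== PRECONDITION & SPEC =====
-- The grammar of a well-formed suffix: every backslash reached before the first
-- unescaped space is immediately followed by a space.
def goodTail : List Char → Bool
  | [] => true
  | [c] => c ≠ '\\'
  | c :: c2 :: rest =>
    if c = '\\' then c2 = ' ' && goodTail rest
    else if c = ' ' then true
    else goodTail (c2 :: rest)

-- Pre_ excludes (a) the inputs where A raises ParseError (a bad or unclosed
-- escape before the first unescaped space), and (b) negative start indices,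
-- which are outside the function's natural domain: A's value there is an
-- artefact of Python's negative-index wraparound.
def Pre_read_pattern_py (line : String) (i : Int) : Prop :=
  0 ≤ i ∧ goodTail (line.toList.drop i.toNat) = true
instance (line : String) (i : Int) : Decidable (Pre_read_pattern_py line i) := by
  unfold Pre_read_pattern_py; infer_instance

def pvWitness_read_pattern_py : String × Int := ("a\\ b c", 0)

def Spec_read_pattern_py (line : String) (i : Int) (out : String × Int) : Prop :=
  out = read_pattern_py_alt line i
instance (line : String) (i : Int) (out : String × Int) :
    Decidable (Spec_read_pattern_py line i out) := by
  unfold Spec_read_pattern_py; infer_instance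

-- ===== CLAIM (what is proved, stated in full; the proofs are below) =====
def Claim_equal_read_pattern_py : Prop :=
  ∀ (line : String) (i : Int), Dom_read_pattern_py line i →
    Pre_read_pattern_py line i →
    Spec_read_pattern_py line i (read_pattern_py line i)

-- ===== LEMMAS AND PROOFS =====

lemma goodTail_bs (c2 : Char) (rest : List Char) :
    goodTail ('\\' :: c2 :: rest) = (c2 = ' ' && goodTail rest) := by
  simp [goodTail]

lemma goodTail_other {c : Char} (h1 : c ≠ '\\') (h2 : c ≠ ' ') (rest : List Char) :
    goodTail (c :: rest) = goodTail rest := by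
  cases rest with
  | nil => simp [goodTail, h1]
  | cons c2 r => simp [goodTail, h1, h2]

-- findCh characterisations
lemma findCh_some {cs : List Char} {c : Char} {start stop s : Nat}
    (h : findCh cs c start stop = some s) :
    start ≤ s ∧ s < stop ∧ s < cs.length ∧ cs.getD s ' ' = c ∧
      ∀ j, start ≤ j → j < s → cs.getD j ' ' ≠ c := by
  unfold findCh at h
  rcases Option.map_eq_some_iff.mp h with ⟨k, hk, hsk⟩
  rw [List.findIdx?_eq_some_iff_getElem] at hk
  obtain ⟨hlt, hval, hprev⟩ := hk
  have hwin : ((cs.take stop).drop start).length = min stop cs.length - start := by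
    simp
  have hs1 : start + k < min stop cs.length := by omega
  have hget : ∀ m (hm : m < ((cs.take stop).drop start).length),
      ((cs.take stop).drop start)[m] = cs[start + m]'(by
        have := hwin ▸ hm; omega) := by
    intro m hm
    rw [List.getElem_drop, List.getElem_take]
  subst hsk
  refine ⟨by omega, by omega, by omega, ?_, ?_⟩
  · have := hget k hlt
    rw [this] at hval
    have hb : cs.getD (start + k) ' ' = cs[start + k]'(by omega) := by
      simp [List.getD, List.getElem?_eq_getElem (by omega : start + k < cs.length)]
    rw [hb]
    exact of_decide_eq_true hval
  · intro j hj1 hj2 hne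
    have hm : j - start < k := by omega
    have hprev' := hprev (j - start) hm
    have := hget (j - start) (by omega)
    have hj : start + (j - start) = j := by omega
    rw [this] at hprev'
    simp only [hj] at hprev'
    have hb : cs.getD j ' ' = cs[j]'(by omega) := by
      simp [List.getD, List.getElem?_eq_getElem (by omega : j < cs.length)]
    rw [hb] at hne
    exact hprev' (by simp [hne])

lemma findCh_none {cs : List Char} {c : Char} {start stop : Nat}
    (h : findCh cs c start stop = none) :
    ∀ j, start ≤ j → j < stop → j < cs.length → cs.getD j ' ' ≠ c := by
  unfold findCh at h
  have h2 := List.findIdx?_eq_none_iff.mp (Option.map_eq_none_iff.mp h)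
  intro j hj1 hj2 hjl hne
  have hmem : cs[j]'hjl ∈ (cs.take stop).drop start := by
    have hwl : j - start < ((cs.take stop).drop start).length := by simp; omega
    have : ((cs.take stop).drop start)[j - start] = cs[start + (j - start)]'(by omega) := by
      rw [List.getElem_drop, List.getElem_take]
    have hj : start + (j - start) = j := by omega
    simp only [hj] at this
    exact this ▸ List.getElem_mem hwl
  have := h2 _ hmem
  have hb : cs.getD j ' ' = cs[j]'hjl := by
    simp [List.getD, List.getElem?_eq_getElem hjl]
  rw [hb] at hne
  simp [hne] at this

-- A single plain character neither changes goodTail nor stops A's loop.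
lemma goodTail_drop_skip (cs : List Char) (k : Nat) (hk : k ≤ cs.length) :
    ∀ (n i0 : Nat), n = k - i0 → i0 ≤ k →
    (∀ j, i0 ≤ j → j < k → cs.getD j ' ' ≠ '\\' ∧ cs.getD j ' ' ≠ ' ') →
    goodTail (cs.drop i0) = goodTail (cs.drop k) := by
  intro n
  induction n with
  | zero =>
    intro i0 h1 h2 _
    have : i0 = k := by omega
    rw [this]
  | succ n ih =>
    intro i0 h1 h2 hplain
    by_cases he : i0 = k
    · rw [he]
    · have hi0 : i0 < k := by omega
      have hl : i0 < cs.length := by omega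
      have hdrop : cs.drop i0 = cs[i0] :: cs.drop (i0 + 1) := List.drop_eq_getElem_cons hl
      have hgd : cs.getD i0 ' ' = cs[i0] := by
        simp [List.getD, List.getElem?_eq_getElem hl]
      obtain ⟨ha, hb⟩ := hplain i0 (le_refl _) hi0
      rw [hgd] at ha hb
      rw [hdrop, goodTail_other ha hb]
      exact ih (i0 + 1) (by omega) (by omega)
        (fun j hj1 hj2 => hplain j (by omega) hj2)

-- A skips over a run of plain characters, appending the slice.
lemma A_skip (cs : List Char) (k : Nat) (hk : k ≤ cs.length) :
    ∀ (n i0 : Nat) (acc : List Char), n = k - i0 → i0 ≤ k →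
    (∀ j, i0 ≤ j → j < k → cs.getD j ' ' ≠ '\\' ∧ cs.getD j ' ' ≠ ' ') →
    readA_loop cs (i0 : Int) false acc
      = readA_loop cs (k : Int) false (acc ++ (cs.take k).drop i0) := by
  intro n
  induction n with
  | zero =>
    intro i0 acc h1 h2 _
    have he : i0 = k := by omega
    subst he
    have : (cs.take i0).drop i0 = [] := by
      apply List.drop_eq_nil_of_le; simp
    rw [this, List.append_nil]
  | succ n ih =>
    intro i0 acc h1 h2 hplain
    by_cases he : i0 = k
    · subst he
      have : (cs.take i0).drop i0 = [] := by
        apply List.drop_eq_nil_of_le; simp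
      rw [this, List.append_nil]
    · have hi0 : i0 < k := by omega
      have hl : i0 < cs.length := by omega
      have hgd : cs.getD i0 ' ' = cs[i0] := by
        simp [List.getD, List.getElem?_eq_getElem hl]
      obtain ⟨ha, hb⟩ := hplain i0 (le_refl _) hi0
      rw [hgd] at ha hb
      have hget : PySem.List.pyGet? cs (i0 : Int) = some cs[i0] := by
        rw [PySem.List.pyGet?_of_nonneg cs (by omega)]
        simp [List.getElem?_eq_getElem hl]
      rw [readA_loop]
      have hlt : (i0 : Int) < (cs.length : Int) := by omega
      rw [dif_pos hlt, hget]
      simp only [Bool.false_eq_true, if_false, ha, hb]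
      have hcast : (i0 : Int) + 1 = ((i0 + 1 : Nat) : Int) := by push_cast; ring
      rw [hcast]
      rw [ih (i0 + 1) (acc ++ [cs[i0]]) (by omega) (by omega)
        (fun j hj1 hj2 => hplain j (by omega) hj2)]
      congr 1
      have htl : i0 < (cs.take k).length := by simp; omega
      have : (cs.take k).drop i0 = (cs.take k)[i0] :: (cs.take k).drop (i0 + 1) :=
        List.drop_eq_getElem_cons htl
      rw [this, List.getElem_take]
      simp

lemma loop_eq (n : Nat) : ∀ (cs : List Char) (i : Int) (acc : List Char),
    0 ≤ i → ((cs.length : Int) - i).toNat ≤ n →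
    goodTail (cs.drop i.toNat) = true →
    readA_loop cs i false acc = readB_loop cs i acc := by
  induction n with
  | zero =>
    intro cs i acc hi hn _
    have hlen : ¬ i < (cs.length : Int) := by omega
    rw [readA_loop, readB_loop]
    simp [hlen]
  | succ n ih =>
    intro cs i acc hi hn hg
    by_cases hlt : i < (cs.length : Int)
    · -- normalise the index to a Nat
      obtain ⟨i0, rfl⟩ : ∃ i0 : Nat, i = (i0 : Int) :=
        ⟨i.toNat, (Int.toNat_of_nonneg hi).symm⟩
      have hi0len : i0 < cs.length := by omega
      have htn : ((i0 : Int)).toNat = i0 := by omega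
      rw [htn] at hg
      rw [readB_loop, dif_pos hlt]
      simp only [htn]
      set b : Nat := (findCh cs '\\' i0 cs.length).getD cs.length with hbdef
      -- facts about b
      have hbge : i0 ≤ b := findCh_getD_ge cs '\\' i0 cs.length (by omega)
      have hble : b ≤ cs.length := by
        rcases hfb : findCh cs '\\' i0 cs.length with _ | s
        · simp [hbdef, hfb]
        · have := findCh_some hfb
          simp [hbdef, hfb]; omega
      have hnobs : ∀ j, i0 ≤ j → j < b → cs.getD j ' ' ≠ '\\' := by
        intro j hj1 hj2
        rcases hfb : findCh cs '\\' i0 cs.length with _ | s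
        · exact findCh_none hfb j hj1 (by omega) (by omega)
        · obtain ⟨_, _, _, _, hprev⟩ := findCh_some hfb
          have hbs : b = s := by simp [hbdef, hfb]
          exact hprev j hj1 (by omega)
      have hbbs : b < cs.length → cs.getD b ' ' = '\\' := by
        intro hblt
        rcases hfb : findCh cs '\\' i0 cs.length with _ | s
        · simp [hbdef, hfb] at hblt
        · obtain ⟨_, _, _, hval, _⟩ := findCh_some hfb
          have hbs : b = s := by simp [hbdef, hfb]
          rw [hbs]; exact hval
      rcases hfs : findCh cs ' ' i0 b with _ | s
      · -- no space before the first backslash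
        have hplain : ∀ j, i0 ≤ j → j < b →
            cs.getD j ' ' ≠ '\\' ∧ cs.getD j ' ' ≠ ' ' := by
          intro j hj1 hj2
          exact ⟨hnobs j hj1 hj2, findCh_none hfs j hj1 hj2 (by omega)⟩
        have hskip := A_skip cs b hble (b - i0) i0 acc rfl hbge hplain
        have hgt := goodTail_drop_skip cs b hble (b - i0) i0 rfl hbge hplain
        rw [hgt] at hg
        rw [hskip]
        by_cases hblt : (b : Int) < (cs.length : Int)
        · -- A reads the backslash, goes escaped, reads the space
          have hblt' : b < cs.length := by omega
          have hgdb : cs.getD b ' ' = cs[b] := by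
            simp [List.getD, List.getElem?_eq_getElem hblt']
          have hbsv : cs[b] = '\\' := by rw [← hgdb]; exact hbbs hblt'
          -- goodTail forces a following space
          have hdropb : cs.drop b = '\\' :: cs.drop (b + 1) := by
            rw [List.drop_eq_getElem_cons hblt', hbsv]
          rw [hdropb] at hg
          rcases hrest : cs.drop (b + 1) with _ | ⟨c2, r⟩
          · rw [hrest] at hg
            exact absurd hg (by decide)
          · rw [hrest, goodTail_bs, Bool.and_eq_true] at hg
            obtain ⟨hc2, hgr⟩ := hg
            have hc2' : c2 = ' ' := by simpa using hc2
            subst hc2'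
            have hb1 : b + 1 < cs.length := by
              by_contra hcon
              have : cs.drop (b + 1) = [] := List.drop_eq_nil_of_le (by omega)
              rw [hrest] at this; simp at this
            have hdrop1 : cs.drop (b + 1) = cs[b + 1] :: cs.drop (b + 2) :=
              List.drop_eq_getElem_cons hb1
            rw [hdrop1] at hrest
            have he : cs[b + 1] = ' ' := (List.cons.injEq _ _ _ _ ▸ hrest).1
            have hr : cs.drop (b + 2) = r := (List.cons.injEq _ _ _ _ ▸ hrest).2
            have hgetb : PySem.List.pyGet? cs (b : Int) = some '\\' := by
              rw [PySem.List.pyGet?_of_nonneg cs (by omega)]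
              have : ((b : Int)).toNat = b := by omega
              rw [this, List.getElem?_eq_getElem hblt', hbsv]
            have hget1 : PySem.List.pyGet? cs ((b : Int) + 1) = some ' ' := by
              rw [PySem.List.pyGet?_of_nonneg cs (by omega)]
              have : ((b : Int) + 1).toNat = b + 1 := by omega
              rw [this, List.getElem?_eq_getElem hb1, he]
            -- unfold A twice: backslash step, then escaped space step
            rw [readA_loop, dif_pos hblt, hgetb]
            simp only [Bool.false_eq_true, if_false, ite_true]
            have hlt1 : (b : Int) + 1 < (cs.length : Int) := by omega
            rw [readA_loop, dif_pos hlt1, hget1]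
            simp only [ne_eq, not_true_eq_false, if_false, reduceIte]
            have hih := ih cs ((b : Int) + 2) (acc ++ (cs.take b).drop i0 ++ [' '])
              (by omega) (by omega)
              (by
                have : ((b : Int) + 2).toNat = b + 2 := by omega
                rw [this, hr]; exact hgr)
            have h11 : (b : Int) + 1 + 1 = (b : Int) + 2 := by ring
            rw [h11, dif_pos hblt,
              if_neg (by omega : ¬ (cs.length : Int) ≤ (b : Int) + 1)]
            exact hih
        · -- b = length: the whole tail is plain, both stop at the end
          have hbeq : (b : Int) = (cs.length : Int) := by omega
          rw [readA_loop, dif_neg (by omega : ¬ (b : Int) < (cs.length : Int))]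
          rw [dif_neg hblt]
          simp
      · -- unescaped space found at s before the first backslash
        obtain ⟨hs1, hs2, hs3, hval, hprev⟩ := findCh_some hfs
        have hplain : ∀ j, i0 ≤ j → j < s →
            cs.getD j ' ' ≠ '\\' ∧ cs.getD j ' ' ≠ ' ' := by
          intro j hj1 hj2
          exact ⟨hnobs j hj1 (by omega), hprev j hj1 hj2⟩
        have hskip := A_skip cs s (by omega) (s - i0) i0 acc rfl hs1 hplain
        rw [hskip]
        have hgds : cs.getD s ' ' = cs[s]'hs3 := by
          simp [List.getD, List.getElem?_eq_getElem hs3]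
        have hsv : cs[s]'hs3 = ' ' := by rw [← hgds]; exact hval
        have hgets : PySem.List.pyGet? cs (s : Int) = some ' ' := by
          rw [PySem.List.pyGet?_of_nonneg cs (by omega)]
          have : ((s : Int)).toNat = s := by omega
          rw [this, List.getElem?_eq_getElem hs3, hsv]
        rw [readA_loop, dif_pos (by omega : (s : Int) < (cs.length : Int)), hgets]
        simp
    · rw [readA_loop, readB_loop]
      simp [hlt]

-- ===== VERDICT (by name: the statement is the Claim_ definition above) =====
theorem read_pattern_py_spec : Claim_equal_read_pattern_py := by
  intro line i _ hpre
  obtain ⟨h0, hg⟩ := hpre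
  unfold Spec_read_pattern_py read_pattern_py read_pattern_py_alt
  rw [loop_eq ((line.toList.length : Int) - i).toNat line.toList i [] h0 (le_refl _) hg]
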